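-- pv_equiv track=rewrite | github.com/theseven7h/PhaseGateOne | Python/studentgrade.py | get_overall_highest_and_lowest
-- ===== SOURCE A (Python) =====
-- def get_overall_highest_and_lowest(student_scores):
-- 	overall_highest = student_scores[0][0]
-- 	highest_student = 1
-- 	highest_subject = 1
--
-- 	overall_lowest = student_scores[0][0];
-- 	lowest_student = 1
-- 	lowest_subject = 1
--
-- 	for i in range(len(student_scores)):
-- 		for j in range(len(student_scores[0])):
-- 			if student_scores[i][j] > overall_highest:
-- 				overall_highest = student_scores[i][j]
-- 				highest_student = i + 1
-- 				highest_subject = j + 1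
--
-- 			if student_scores[i][j] < overall_lowest:
-- 				overall_lowest = student_scores[i][j]
-- 				lowest_student = i + 1
-- 				lowest_subject = j + 1
-- 	return [[overall_highest, highest_student, highest_subject], [overall_lowest, lowest_student, lowest_subject]]
-- ===== SOURCE B (Python) =====
-- def get_overall_highest_and_lowest(student_scores):
--     cols = len(student_scores[0])
--     cells = [(row[j], i, j + 1)
--              for i, row in enumerate(student_scores, 1)
--              for j in range(cols)]
--     hi = max(cells, key=lambda c: c[0])
--     lo = min(cells, key=lambda c: c[0])
--     return [list(hi), list(lo)]
-- ===== Notes on version B (the rewrite author's own statement) =====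
-- stated objective: idiomatic
-- what changed: B flattens the matrix into one comprehension of (value, row, col) cells and selects the extremes with max/min keyed on the value, instead of A's nested index loops threading six running accumulators; Pre_ excludes only inputs where A raises IndexError (empty matrix, empty first row, or a row shorter than the first).
import Mathlib
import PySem

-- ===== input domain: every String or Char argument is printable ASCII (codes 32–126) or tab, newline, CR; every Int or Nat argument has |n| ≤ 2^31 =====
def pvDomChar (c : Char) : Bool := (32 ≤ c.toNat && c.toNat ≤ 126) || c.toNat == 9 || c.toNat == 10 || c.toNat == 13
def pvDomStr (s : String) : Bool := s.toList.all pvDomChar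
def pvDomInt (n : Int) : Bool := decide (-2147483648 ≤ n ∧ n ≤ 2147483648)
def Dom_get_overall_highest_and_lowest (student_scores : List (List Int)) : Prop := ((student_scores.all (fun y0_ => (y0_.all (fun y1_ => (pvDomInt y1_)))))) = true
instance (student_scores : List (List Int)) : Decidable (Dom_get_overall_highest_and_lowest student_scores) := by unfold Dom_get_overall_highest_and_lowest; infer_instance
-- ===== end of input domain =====

-- B: one flat cell list + max/min keyed on the value, instead of A's nested index loops; equivalence of return values on Pre_ (A raises elsewhere).

-- ===== PORT A =====
def get_overall_highest_and_lowest (student_scores : List (List Int)) : List (List Int) :=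
  let overall_highest := PySem.List.pyGetD (PySem.List.pyGetD student_scores 0 []) 0 0
  let st :=
    (PySem.List.pyRange 0 (PySem.List.len student_scores) 1).foldl (fun st i =>
      (PySem.List.pyRange 0 (PySem.List.len (PySem.List.pyGetD student_scores 0 [])) 1).foldl (fun st j =>
        let v := PySem.List.pyGetD (PySem.List.pyGetD student_scores i []) j 0
        let st := if v > st.1.1 then ((v, i + 1, j + 1), st.2) else st
        if v < st.2.1 then (st.1, (v, i + 1, j + 1)) else st) st)
      ((overall_highest, 1, 1), (overall_highest, 1, 1))
  [[st.1.1, st.1.2.1, st.1.2.2], [st.2.1, st.2.2.1, st.2.2.2]]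

-- ===== PORT B =====
def get_overall_highest_and_lowest_alt (student_scores : List (List Int)) : List (List Int) :=
  let cols := PySem.List.len (PySem.List.pyGetD student_scores 0 [])
  let cells := (PySem.List.enumerate student_scores 1).flatMap (fun p =>
    (PySem.List.pyRange 0 cols 1).map (fun j => (PySem.List.pyGetD p.2 j 0, p.1, j + 1)))
  let hi := (PySem.List.max? cells (fun c => c.1)).getD (0, 0, 0)
  let lo := (PySem.List.min? cells (fun c => c.1)).getD (0, 0, 0)
  [[hi.1, hi.2.1, hi.2.2], [lo.1, lo.2.1, lo.2.2]]

-- ===== PRECONDITION & SPEC =====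
-- Pre_ excludes exactly the inputs on which Python A raises IndexError: an empty matrix,
-- an empty first row, or a row shorter than the first row.
def Pre_get_overall_highest_and_lowest (student_scores : List (List Int)) : Prop :=
  student_scores ≠ [] ∧ student_scores.headI ≠ [] ∧
    ∀ row ∈ student_scores, student_scores.headI.length ≤ row.length
instance (student_scores : List (List Int)) : Decidable (Pre_get_overall_highest_and_lowest student_scores) := by unfold Pre_get_overall_highest_and_lowest; infer_instance

def pvWitness_get_overall_highest_and_lowest : List (List Int) := [[3, 7], [5, 1]]

def Spec_get_overall_highest_and_lowest (student_scores : List (List Int)) (out : List (List Int)) : Prop := out = get_overall_highest_and_lowest_alt student_scores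
instance (student_scores : List (List Int)) (out : List (List Int)) : Decidable (Spec_get_overall_highest_and_lowest student_scores out) := by unfold Spec_get_overall_highest_and_lowest; infer_instance

-- ===== CLAIM (what is proved, stated in full; the proofs are below) =====
def Claim_equal_get_overall_highest_and_lowest : Prop := ∀ (student_scores : List (List Int)), Dom_get_overall_highest_and_lowest student_scores → Pre_get_overall_highest_and_lowest student_scores → Spec_get_overall_highest_and_lowest student_scores (get_overall_highest_and_lowest student_scores)

-- ===== LEMMAS AND PROOFS =====

-- A's loop body as a step function on the (highest, lowest) accumulator pair.
def pvStep (st : (Int × Int × Int) × (Int × Int × Int)) (c : Int × Int × Int) :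
    (Int × Int × Int) × (Int × Int × Int) :=
  let st := if c.1 > st.1.1 then (c, st.2) else st
  if c.1 < st.2.1 then (st.1, c) else st

lemma pvStep_eq (st : (Int × Int × Int) × (Int × Int × Int)) (c : Int × Int × Int) :
    pvStep st c = (if st.1.1 < c.1 then c else st.1, if c.1 < st.2.1 then c else st.2) := by
  simp only [pvStep, gt_iff_lt]
  split_ifs <;> rfl

lemma pvFoldl_pvStep (l : List (Int × Int × Int)) (a b : Int × Int × Int) :
    l.foldl pvStep (a, b) =
      (l.foldl (fun m x => if m.1 < x.1 then x else m) a,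
       l.foldl (fun m x => if x.1 < m.1 then x else m) b) := by
  have h : pvStep = fun (s : (Int × Int × Int) × (Int × Int × Int)) e =>
      ((fun (m x : Int × Int × Int) => if m.1 < x.1 then x else m) s.1 e,
       (fun (m x : Int × Int × Int) => if x.1 < m.1 then x else m) s.2 e) := by
    funext s e; exact pvStep_eq s e
  rw [h]
  exact PySem.List.foldl_prod_mk (fun m x => if m.1 < x.1 then x else m)
    (fun m x => if x.1 < m.1 then x else m) l a b

lemma pvMaxFoldl_some {α κ : Type} [LT κ] [DecidableLT κ] (key : α → κ) :
    ∀ (l : List α) (c : α),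
      l.foldl (fun acc x => match acc with
        | none => some x
        | some m => if key m < key x then some x else some m) (some c)
      = some (l.foldl (fun m x => if key m < key x then x else m) c)
  | [], c => rfl
  | x :: l, c => by
    simp only [List.foldl]
    split_ifs <;> exact pvMaxFoldl_some key l _

lemma pvMinFoldl_some {α κ : Type} [LT κ] [DecidableLT κ] (key : α → κ) :
    ∀ (l : List α) (c : α),
      l.foldl (fun acc x => match acc with
        | none => some x
        | some m => if key x < key m then some x else some m) (some c)
      = some (l.foldl (fun m x => if key x < key m then x else m) c)
  | [], c => rfl
  | x :: l, c => by
    simp only [List.foldl]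
    split_ifs <;> exact pvMinFoldl_some key l _

lemma pvMax?_cons {α κ : Type} [LT κ] [DecidableLT κ] (key : α → κ) (c : α) (l : List α) :
    PySem.List.max? (c :: l) key = some (l.foldl (fun m x => if key m < key x then x else m) c) := by
  simp only [PySem.List.max?, List.foldl]
  exact pvMaxFoldl_some key l c

lemma pvMin?_cons {α κ : Type} [LT κ] [DecidableLT κ] (key : α → κ) (c : α) (l : List α) :
    PySem.List.min? (c :: l) key = some (l.foldl (fun m x => if key x < key m then x else m) c) := by
  simp only [PySem.List.min?, List.foldl]
  exact pvMinFoldl_some key l c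

lemma pvFoldl_flatMap {α β σ : Type} (f : α → List β) (g : σ → β → σ) :
    ∀ (l : List α) (init : σ),
      (l.flatMap f).foldl g init = l.foldl (fun st x => (f x).foldl g st) init
  | [], _ => rfl
  | x :: l, init => by
    simp only [List.flatMap_cons, List.foldl_append, List.foldl]
    exact pvFoldl_flatMap f g l _

lemma pvEnum_shift {α : Type} : ∀ (xs : List α) (s : Int),
    PySem.List.enumerate xs (s + 1) = (PySem.List.enumerate xs s).map (fun p => (p.1 + 1, p.2))
  | [], _ => rfl
  | x :: xs, s => by
    simp only [PySem.List.enumerate_cons, List.map_cons]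
    exact congrArg _ (pvEnum_shift xs (s + 1))

lemma pvEnum_one (xs : List (List Int)) :
    PySem.List.enumerate xs 1 =
      (PySem.List.pyRange 0 (PySem.List.len xs) 1).map
        (fun i => (i + 1, PySem.List.pyGetD xs i ([] : List Int))) := by
  have h0 : (1 : Int) = 0 + 1 := by norm_num
  rw [h0, pvEnum_shift, PySem.List.enumerate_eq_map_pyRange xs ([] : List Int), List.map_map]
  rfl

lemma pvA_eq (ss : List (List Int)) :
    get_overall_highest_and_lowest ss =
      (let v0 := PySem.List.pyGetD (PySem.List.pyGetD ss 0 []) 0 0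
       let st := (PySem.List.pyRange 0 (PySem.List.len ss) 1).foldl (fun st i =>
         (PySem.List.pyRange 0 (PySem.List.len (PySem.List.pyGetD ss 0 [])) 1).foldl
           (fun st j => pvStep st (PySem.List.pyGetD (PySem.List.pyGetD ss i []) j 0, i + 1, j + 1)) st)
         ((v0, 1, 1), (v0, 1, 1))
       [[st.1.1, st.1.2.1, st.1.2.2], [st.2.1, st.2.2.1, st.2.2.2]]) := rfl

lemma pvLoops (ss : List (List Int)) (C : Int)
    (init : (Int × Int × Int) × (Int × Int × Int)) :
    ((PySem.List.enumerate ss 1).flatMap (fun p =>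
        (PySem.List.pyRange 0 C 1).map (fun j => (PySem.List.pyGetD p.2 j 0, p.1, j + 1)))).foldl
        pvStep init
    = (PySem.List.pyRange 0 (PySem.List.len ss) 1).foldl (fun st i =>
        (PySem.List.pyRange 0 C 1).foldl
          (fun st j => pvStep st (PySem.List.pyGetD (PySem.List.pyGetD ss i []) j 0, i + 1, j + 1)) st)
        init := by
  rw [pvEnum_one, pvFoldl_flatMap]
  simp only [List.foldl_map]

-- ===== VERDICT (proof of the claim) =====
theorem get_overall_highest_and_lowest_spec : Claim_equal_get_overall_highest_and_lowest := by
  intro ss _ hpre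
  obtain ⟨hne, hh, -⟩ := hpre
  obtain ⟨r0, rest, rfl⟩ := List.exists_cons_of_ne_nil hne
  simp only [List.headI] at hh
  obtain ⟨h0, t0, rfl⟩ := List.exists_cons_of_ne_nil hh
  unfold Spec_get_overall_highest_and_lowest
  simp only [pvA_eq]
  rw [← pvLoops ((h0 :: t0) :: rest) (PySem.List.len (PySem.List.pyGetD ((h0 :: t0) :: rest) 0 []))]
  unfold get_overall_highest_and_lowest_alt
  have hrow : PySem.List.pyGetD ((h0 :: t0) :: rest) 0 ([] : List Int) = h0 :: t0 :=
    PySem.List.pyGetD_zero_cons _ _ _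
  simp only [hrow, PySem.List.pyGetD_zero_cons]
  have hlen : (0 : Int) < PySem.List.len (h0 :: t0) := by
    simp [PySem.List.len_eq]
  have hcells : List.flatMap
      (fun p => List.map (fun j => (PySem.List.pyGetD p.2 j 0, p.1, j + 1))
        (PySem.List.pyRange 0 (PySem.List.len (h0 :: t0))))
      (PySem.List.enumerate ((h0 :: t0) :: rest) 1)
      = ((h0 : Int), (1 : Int), (1 : Int)) ::
        (List.map (fun j => (PySem.List.pyGetD (h0 :: t0) j 0, (1 : Int), j + 1))
          (PySem.List.pyRange (0 + 1) (PySem.List.len (h0 :: t0)) 1)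
        ++ List.flatMap
          (fun p => List.map (fun j => (PySem.List.pyGetD p.2 j 0, p.1, j + 1))
            ((0 : Int) :: PySem.List.pyRange (0 + 1) (PySem.List.len (h0 :: t0)) 1))
          (PySem.List.enumerate rest (1 + 1))) := by
    rw [PySem.List.enumerate_cons, List.flatMap_cons, PySem.List.pyRange_one_cons hlen,
      List.map_cons, List.cons_append]
    norm_num [PySem.List.pyGetD_zero_cons]
  rw [hcells]
  generalize (List.map (fun j => (PySem.List.pyGetD (h0 :: t0) j 0, (1 : Int), j + 1))
        (PySem.List.pyRange (0 + 1) (PySem.List.len (h0 :: t0)) 1)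
      ++ List.flatMap
        (fun p => List.map (fun j => (PySem.List.pyGetD p.2 j 0, p.1, j + 1))
          ((0 : Int) :: PySem.List.pyRange (0 + 1) (PySem.List.len (h0 :: t0)) 1))
        (PySem.List.enumerate rest (1 + 1))) = tl
  have hstep0 : pvStep ((h0, 1, 1), (h0, 1, 1)) (h0, 1, 1) = ((h0, 1, 1), (h0, 1, 1)) := by
    simp [pvStep_eq]
  rw [List.foldl_cons, hstep0, pvFoldl_pvStep, pvMax?_cons, pvMin?_cons]
  rfl
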